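-- pv_equiv track=rewrite | github.com/Bubbl-Wallet/main | hardware/signing.py | encode_type
-- ===== SOURCE A (Python) =====
-- def encode_type(primary_type, types):
--     """Encode a struct type according to EIP-712"""
--     result = primary_type + "("
--
--     # Get the type definition
--     type_def = types.get(primary_type, [])
--
--     # Add each field
--     field_strings = []
--     for field in type_def:
--         field_strings.append(f"{field['type']} {field['name']}")
--
--     result += ",".join(field_strings) + ")"
--
--     # Recursively add referenced types in alphabetical order
--     referenced_types = set()
--     _find_dependencies(primary_type, types, referenced_types)
--     referenced_types.discard(primary_type)  # Remove primary type itself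
--
--     # Sort referenced types alphabetically
--     for ref_type in sorted(referenced_types):
--         if ref_type in types:
--             ref_def = types[ref_type]
--             ref_fields = []
--             for field in ref_def:
--                 ref_fields.append(f"{field['type']} {field['name']}")
--             result += ref_type + "(" + ",".join(ref_fields) + ")"
--
--     return result
--
-- def _find_dependencies(primary_type, types, found_types):
--     """Find all type dependencies recursively"""
--     if primary_type in found_types or primary_type not in types:
--         return
--
--     found_types.add(primary_type)
--
--     # Look for custom types in the fields
--     for field in types[primary_type]:
--         field_type = field['type']
--
--         # Handle arrays
--         if field_type.endswith('[]'):
--             field_type = field_type[:-2]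
--
--         # If it's a custom type, recurse
--         if field_type in types and field_type not in found_types:
--             _find_dependencies(field_type, types, found_types)
-- ===== SOURCE B (Python) =====
-- def encode_type(primary_type, types):
--     """Encode a struct type according to EIP-712 (iterative dependency walk)."""
--     # Collect referenced struct types with an explicit stack instead of recursion.
--     visited = set()
--     stack = [primary_type]
--     while stack:
--         t = stack.pop()
--         if t in visited or t not in types:
--             continue
--         visited.add(t)
--         children = []
--         for field in types[t]:
--             ft = field['type']
--             if ft.endswith('[]'):
--                 ft = ft[:-2]
--             children.append(ft)
--         stack.extend(reversed(children))
--     visited.discard(primary_type)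
--
--     def enc(name, fields):
--         return name + "(" + ",".join(f['type'] + " " + f['name'] for f in fields) + ")"
--
--     result = enc(primary_type, types.get(primary_type, []))
--     for name in sorted(visited):
--         result += enc(name, types[name])
--     return result
-- ===== Notes on version B (the rewrite author's own statement) =====
-- stated objective: alternative
-- what changed: The recursive _find_dependencies helper is replaced by an explicit-stack worklist loop with a visited set (pop a type, skip if seen or unknown, push its stripped field types), and the output is assembled by a single enc() helper; the sorted emission makes the traversal order irrelevant.
-- outside the precondition, e.g. on encode_type('A', {'A': [], 'B': [{}]}): A returns 'A()', B returns 'A()'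
import Mathlib
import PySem

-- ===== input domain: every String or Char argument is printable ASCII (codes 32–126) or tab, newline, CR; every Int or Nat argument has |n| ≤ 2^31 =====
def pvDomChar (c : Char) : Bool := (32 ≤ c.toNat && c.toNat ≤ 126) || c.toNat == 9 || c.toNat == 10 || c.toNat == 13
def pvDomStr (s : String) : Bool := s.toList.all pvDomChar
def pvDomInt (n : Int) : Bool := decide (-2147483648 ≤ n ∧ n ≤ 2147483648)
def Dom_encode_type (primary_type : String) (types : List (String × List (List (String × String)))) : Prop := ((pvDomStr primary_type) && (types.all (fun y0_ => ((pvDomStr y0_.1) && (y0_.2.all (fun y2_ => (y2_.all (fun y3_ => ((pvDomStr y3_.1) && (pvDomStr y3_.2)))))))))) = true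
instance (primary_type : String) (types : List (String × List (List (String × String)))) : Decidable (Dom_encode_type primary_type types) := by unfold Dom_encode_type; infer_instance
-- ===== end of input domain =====

-- B replaces A's recursive dependency helper by an explicit-stack worklist walk (alternative
-- decomposition, same cost); equivalence is about the return value (neither mutates its input).

-- ===== PORT A =====
-- dict lookup on the association-list representation: first match (the type convention)
def pvLookup {α : Type} : List (String × α) → String → Option α
  | [], _ => none
  | (k, v) :: rest, key => if k == key then some v else pvLookup rest key

-- the identical three-line snippet of both Pythons: strip one trailing '[]'
def pvStrip (ft : String) : String :=
  if PySem.Str.endswith ft "[]" then PySem.Str.slice ft none (some (-2)) else ft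

-- f"{field['type']} {field['name']}"; '.getD ""' totalizes the KeyError case, which Pre_ excludes
def pvFieldStr (field : List (String × String)) : String :=
  ((pvLookup field "type").getD "") ++ " " ++ ((pvLookup field "name").getD "")

-- _find_dependencies; the fuel is a port artifact (Python recursion needs no fuel): each nested
-- call has added one more key to found, so fuel types.length + 1 is never exhausted
def pvFindDeps : Nat → String → List (String × List (List (String × String))) → PySem.Set String → PySem.Set String
  | 0, _, _, found => found
  | n+1, p, types, found =>
    if PySem.Set.contains found p || !(pvLookup types p).isSome then found
    else
      ((pvLookup types p).getD []).foldl
        (fun fd field =>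
          if (pvLookup types (pvStrip ((pvLookup field "type").getD ""))).isSome
              && !PySem.Set.contains fd (pvStrip ((pvLookup field "type").getD "")) then
            pvFindDeps n (pvStrip ((pvLookup field "type").getD "")) types fd
          else fd)
        (PySem.Set.add found p)

def encode_type (primary_type : String) (types : List (String × List (List (String × String)))) : String :=
  let type_def := (pvLookup types primary_type).getD []
  let field_strings := type_def.foldl (fun acc field => acc ++ [pvFieldStr field]) []
  let result := primary_type ++ "(" ++ PySem.Str.join "," field_strings ++ ")"
  let referenced := PySem.Set.discard
      (pvFindDeps (types.length + 1) primary_type types PySem.Set.empty) primary_type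
  (PySem.List.sorted referenced (fun x => x) false).foldl
    (fun res ref =>
      if (pvLookup types ref).isSome then
        res ++ (ref ++ "(" ++
          PySem.Str.join ","
            (((pvLookup types ref).getD []).foldl (fun acc field => acc ++ [pvFieldStr field]) [])
          ++ ")")
      else res)
    result

-- ===== PORT B =====
-- the children list B builds for one visited type (loop appending stripped field types)
def pvChildren (fields : List (List (String × String))) : List String :=
  fields.foldl (fun acc field => acc ++ [pvStrip ((pvLookup field "type").getD "")]) []

-- the while loop; the Lean worklist's head is the top of B's Python stack, so
-- 'stack.extend(reversed(children))' makes the worklist 'children ++ rest'.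
-- Fuel is a port artifact: each pop consumes one unit and pops are bounded by 1 + total field count
def pvVisit : Nat → List String → List (String × List (List (String × String))) → PySem.Set String → PySem.Set String
  | 0, _, _, visited => visited
  | _+1, [], _, visited => visited
  | n+1, t :: rest, types, visited =>
    if PySem.Set.contains visited t || !(pvLookup types t).isSome then pvVisit n rest types visited
    else
      pvVisit n (pvChildren ((pvLookup types t).getD []) ++ rest) types (PySem.Set.add visited t)

def pvFuel (types : List (String × List (List (String × String)))) : Nat :=
  (types.map (fun e => e.2.length)).sum + 1

-- enc(name, fields)
def pvEnc (name : String) (fields : List (List (String × String))) : String :=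
  name ++ "(" ++ PySem.Str.join "," (fields.map pvFieldStr) ++ ")"

def encode_type_alt (primary_type : String) (types : List (String × List (List (String × String)))) : String :=
  let visited := pvVisit (pvFuel types) [primary_type] types PySem.Set.empty
  let refs := PySem.Set.discard visited primary_type
  (PySem.List.sorted refs (fun x => x) false).foldl
    (fun res name => res ++ pvEnc name ((pvLookup types name).getD []))
    (pvEnc primary_type ((pvLookup types primary_type).getD []))

-- ===== PRECONDITION & SPEC =====
-- Pre_ excludes inputs where the primary type is a key of `types` and some field dict lacks a
-- 'type' or 'name' key: on those A (and B) raise KeyError whenever such a field is reachable; a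
-- malformed field that is unreachable from the primary type leaves A returning, so Pre_ is
-- slightly narrower than A's returning set there (the exact set is a reachability condition,
-- not closed form) — see claim.json "cites". If the primary type is not a key, no field is ever
-- read and both programs return.
def Pre_encode_type (primary_type : String) (types : List (String × List (List (String × String)))) : Prop :=
  primary_type ∉ types.map Prod.fst ∨
    ∀ e ∈ types, ∀ f ∈ e.2, "type" ∈ f.map Prod.fst ∧ "name" ∈ f.map Prod.fst

instance (primary_type : String) (types : List (String × List (List (String × String)))) : Decidable (Pre_encode_type primary_type types) := by
  unfold Pre_encode_type; infer_instance

def pvWitness_encode_type : String × (List (String × List (List (String × String)))) :=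
  ("Mail",
   [("Mail", [[("type", "Person"), ("name", "from")], [("type", "string"), ("name", "contents")]]),
    ("Person", [[("type", "address"), ("name", "wallet")]])])

def Spec_encode_type (primary_type : String) (types : List (String × List (List (String × String)))) (out : String) : Prop := out = encode_type_alt primary_type types
instance (primary_type : String) (types : List (String × List (List (String × String)))) (out : String) : Decidable (Spec_encode_type primary_type types out) := by unfold Spec_encode_type; infer_instance

-- ===== CLAIM (what is proved, stated in full; the proofs are below) =====
def Claim_equal_encode_type : Prop := ∀ (primary_type : String) (types : List (String × List (List (String × String)))), Dom_encode_type primary_type types → Pre_encode_type primary_type types → Spec_encode_type primary_type types (encode_type primary_type types)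

-- ===== LEMMAS AND PROOFS =====

theorem pvLookup_isSome_mem {α : Type} (l : List (String × α)) (k : String)
    (h : (pvLookup l k).isSome = true) : k ∈ l.map Prod.fst := by
  induction l with
  | nil => simp [pvLookup] at h
  | cons e rest ih =>
    obtain ⟨a, v⟩ := e
    simp only [pvLookup] at h
    by_cases hk : a == k
    · simp [eq_of_beq hk]
    · rw [if_neg hk] at h
      simpa using Or.inr (ih h)

def pvMissing (types : List (String × List (List (String × String)))) (f : List String) : Nat :=
  ((types.map Prod.fst).toFinset.filter (fun k => k ∉ f)).card

theorem pvMissing_mono (types : List (String × List (List (String × String)))) {f g : List String}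
    (h : f ⊆ g) : pvMissing types g ≤ pvMissing types f := by
  apply Finset.card_le_card
  intro x hx
  simp only [Finset.mem_filter] at *
  exact ⟨hx.1, fun hxf => hx.2 (h hxf)⟩

theorem pvMissing_add_lt (types : List (String × List (List (String × String)))) {f : List String}
    {p : String} (hk : (pvLookup types p).isSome = true) (hp : p ∉ f) :
    pvMissing types (PySem.Set.add f p) < pvMissing types f := by
  apply Finset.card_lt_card
  rw [Finset.ssubset_iff_of_subset]
  · refine ⟨p, ?_, ?_⟩
    · simp only [Finset.mem_filter, List.mem_toFinset]
      exact ⟨pvLookup_isSome_mem _ _ hk, hp⟩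
    · simp only [Finset.mem_filter, not_and, not_not]
      intro _
      exact (PySem.Set.mem_add _ _ _).mpr (Or.inr rfl)
  · intro x hx
    simp only [Finset.mem_filter] at *
    exact ⟨hx.1, fun hxf => hx.2 ((PySem.Set.mem_add _ _ _).mpr (Or.inl hxf))⟩

def pvCostF (types : List (String × List (List (String × String)))) (v : List String) : Nat :=
  match types with
  | [] => 0
  | e :: rest => (if e.1 ∈ v then 0 else e.2.length) + pvCostF rest v

theorem pvCostF_mono (types : List (String × List (List (String × String)))) {f g : List String}
    (h : f ⊆ g) : pvCostF types g ≤ pvCostF types f := by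
  induction types with
  | nil => exact le_refl _
  | cons e rest ih =>
    have hh : (if e.1 ∈ g then 0 else e.2.length) ≤ (if e.1 ∈ f then 0 else e.2.length) := by
      by_cases h2 : e.1 ∈ f
      · simp [h h2, h2]
      · rw [if_neg h2]
        split <;> simp
    exact Nat.add_le_add hh ih

theorem pvCostF_add (types : List (String × List (List (String × String)))) {f : List String}
    {p : String} {fs : List (List (String × String))} (hk : pvLookup types p = some fs) (hp : p ∉ f) :
    fs.length + pvCostF types (PySem.Set.add f p) ≤ pvCostF types f := by
  induction types with
  | nil => simp [pvLookup] at hk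
  | cons e rest ih =>
    obtain ⟨a, gs⟩ := e
    simp only [pvLookup] at hk
    have hsub : f ⊆ PySem.Set.add f p := fun x hx => (PySem.Set.mem_add _ _ _).mpr (Or.inl hx)
    by_cases hap : a == p
    · rw [if_pos hap] at hk
      obtain rfl : gs = fs := by simpa using hk
      have hpadd : a ∈ PySem.Set.add f p :=
        (PySem.Set.mem_add _ _ _).mpr (Or.inr (eq_of_beq hap))
      have hanf : a ∉ f := by rw [eq_of_beq hap]; exact hp
      have hmono := pvCostF_mono rest hsub
      simp only [pvCostF, if_pos hpadd, if_neg hanf]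
      omega
    · rw [if_neg hap] at hk
      have := ih hk
      have hiff : a ∈ PySem.Set.add f p ↔ a ∈ f := by
        rw [PySem.Set.mem_add]
        constructor
        · rintro (h | rfl)
          · exact h
          · simp at hap
        · exact Or.inl
      simp only [pvCostF, hiff]
      split <;> omega

def pvCost (types : List (String × List (List (String × String)))) (ws : List String) (v : List String) : Nat :=
  ws.length + pvCostF types v

def pvChild (field : List (String × String)) : String :=
  pvStrip ((pvLookup field "type").getD "")

theorem pvChildren_eq_map (fields : List (List (String × String))) :
    pvChildren fields = fields.map pvChild := by
  unfold pvChildren pvChild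
  rw [PySem.List.foldl_append_singleton_eq_map]
  simp

theorem pvCostF_empty (types : List (String × List (List (String × String)))) :
    pvCostF types PySem.Set.empty = (types.map (fun e => e.2.length)).sum := by
  show pvCostF types [] = _
  induction types with
  | nil => rfl
  | cons e rest ih => simp [pvCostF, ih]

theorem pvVisit_nil (types : List (String × List (List (String × String)))) (n : Nat) (v : PySem.Set String) :
    pvVisit n [] types v = v := by
  cases n <;> rfl

theorem pvFindDeps_subset (types : List (String × List (List (String × String)))) :
    ∀ (n : Nat) (p : String) (f : PySem.Set String), f ⊆ pvFindDeps n p types f := by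
  intro n
  induction n with
  | zero => intro p f x hx; exact hx
  | succ n ih =>
    intro p f
    unfold pvFindDeps
    split
    · exact fun x hx => hx
    · have aux : ∀ (fields : List (List (String × String))) (g : PySem.Set String),
          g ⊆ fields.foldl (fun fd field =>
            if (pvLookup types (pvStrip ((pvLookup field "type").getD ""))).isSome
                && !PySem.Set.contains fd (pvStrip ((pvLookup field "type").getD "")) then
              pvFindDeps n (pvStrip ((pvLookup field "type").getD "")) types fd
            else fd) g := by
        intro fields
        induction fields with
        | nil => intro g x hx; exact hx
        | cons fl fls ihf =>
          intro g x hx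
          rw [List.foldl_cons]
          apply ihf
          dsimp only
          split
          · exact ih _ _ hx
          · exact hx
      intro x hx
      exact aux _ _ ((PySem.Set.mem_add _ _ _).mpr (Or.inl hx))

theorem pvFindDeps_keys (types : List (String × List (List (String × String)))) :
    ∀ (n : Nat) (p : String) (f : PySem.Set String),
      (∀ x ∈ f, (pvLookup types x).isSome = true) →
      ∀ x ∈ pvFindDeps n p types f, (pvLookup types x).isSome = true := by
  intro n
  induction n with
  | zero => intro p f hf; exact hf
  | succ n ih =>
    intro p f hf
    unfold pvFindDeps
    split
    · exact hf
    · rename_i hcond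
      have hp : (pvLookup types p).isSome = true := by
        simp only [Bool.or_eq_true, Bool.not_eq_true'] at hcond
        by_contra hne
        exact hcond (Or.inr (by simpa using hne))
      have hadd : ∀ x ∈ PySem.Set.add f p, (pvLookup types x).isSome = true := by
        intro x hx
        rcases (PySem.Set.mem_add _ _ _).mp hx with h | rfl
        · exact hf x h
        · exact hp
      have aux : ∀ (fields : List (List (String × String))) (g : PySem.Set String),
          (∀ x ∈ g, (pvLookup types x).isSome = true) →
          ∀ x ∈ fields.foldl (fun fd field =>
            if (pvLookup types (pvStrip ((pvLookup field "type").getD ""))).isSome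
                && !PySem.Set.contains fd (pvStrip ((pvLookup field "type").getD "")) then
              pvFindDeps n (pvStrip ((pvLookup field "type").getD "")) types fd
            else fd) g, (pvLookup types x).isSome = true := by
        intro fields
        induction fields with
        | nil => intro g hg; exact hg
        | cons fl fls ihf =>
          intro g hg
          rw [List.foldl_cons]
          apply ihf
          dsimp only
          split
          · exact ih _ _ hg
          · exact hg
      exact aux _ _ hadd

theorem pvVisit_cons (types : List (String × List (List (String × String)))) (n : Nat)
    (t : String) (rest : List String) (v : PySem.Set String) :
    pvVisit (n+1) (t :: rest) types v
      = if (PySem.Set.contains v t || !(pvLookup types t).isSome) = true then pvVisit n rest types v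
        else pvVisit n (pvChildren ((pvLookup types t).getD []) ++ rest) types (PySem.Set.add v t) := rfl

theorem pvVisit_step (types : List (String × List (List (String × String)))) :
    ∀ (n : Nat) (ws : List String) (v : PySem.Set String), pvCost types ws v ≤ n →
      pvVisit n ws types v = pvVisit (n+1) ws types v := by
  intro n
  induction n using Nat.strong_induction_on with
  | _ n IH =>
    intro ws v hc
    match ws with
    | [] => rw [pvVisit_nil, pvVisit_nil]
    | t :: rest =>
      have h1 : 1 ≤ n := le_trans (by simp [pvCost]; omega) hc
      obtain ⟨k, rfl⟩ : ∃ k, n = k + 1 := ⟨n - 1, by omega⟩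
      show pvVisit (k+1) (t::rest) types v = pvVisit (k+1+1) (t::rest) types v
      by_cases hg : (PySem.Set.contains v t || !(pvLookup types t).isSome) = true
      · rw [pvVisit_cons, pvVisit_cons, if_pos hg, if_pos hg]
        exact IH k (by omega) rest v (by simp [pvCost] at hc ⊢; omega)
      · have hs : (pvLookup types t).isSome = true := by
          simp only [Bool.or_eq_true, Bool.not_eq_true'] at hg
          by_contra hne
          exact hg (Or.inr (by simpa using hne))
        have ht : t ∉ v := by
          simp only [Bool.or_eq_true] at hg
          intro hmem
          exact hg (Or.inl (by simpa using hmem))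
        obtain ⟨fs, hfs⟩ := Option.isSome_iff_exists.mp hs
        rw [pvVisit_cons, pvVisit_cons, if_neg hg, if_neg hg]
        apply IH k (by omega)
        have hlen : (pvChildren ((pvLookup types t).getD [])).length = fs.length := by
          rw [hfs, Option.getD_some, pvChildren_eq_map, List.length_map]
        have hadd := pvCostF_add types hfs ht
        simp only [pvCost, List.length_append, hlen]
        simp only [pvCost] at hc
        simp only [List.length_cons] at hc
        omega

theorem pvVisit_fuel (types : List (String × List (List (String × String))))
    (ws : List String) (v : PySem.Set String) {n m : Nat} (hn : pvCost types ws v ≤ n)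
    (hm : n ≤ m) : pvVisit m ws types v = pvVisit n ws types v := by
  obtain ⟨d, rfl⟩ := Nat.le.dest hm
  clear hm
  induction d with
  | zero => rfl
  | succ d ihd =>
    rw [show n + (d+1) = (n+d)+1 by omega]
    rw [← pvVisit_step types (n+d) ws v (by omega)]
    exact ihd

theorem pvFindDeps_guard (types : List (String × List (List (String × String)))) (n : Nat)
    (p : String) (f : PySem.Set String)
    (h : (PySem.Set.contains f p || !(pvLookup types p).isSome) = true) :
    pvFindDeps n p types f = f := by
  cases n with
  | zero => rfl
  | succ n => unfold pvFindDeps; rw [if_pos h]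

def pvStepA (n : Nat) (types : List (String × List (List (String × String))))
    (fd : PySem.Set String) (field : List (String × String)) : PySem.Set String :=
  if (pvLookup types (pvStrip ((pvLookup field "type").getD ""))).isSome
      && !PySem.Set.contains fd (pvStrip ((pvLookup field "type").getD "")) then
    pvFindDeps n (pvStrip ((pvLookup field "type").getD "")) types fd
  else fd

theorem pvFindDeps_succ (n : Nat) (p : String) (types : List (String × List (List (String × String))))
    (f : PySem.Set String) :
    pvFindDeps (n+1) p types f
      = if (PySem.Set.contains f p || !(pvLookup types p).isSome) = true then f
        else ((pvLookup types p).getD []).foldl (pvStepA n types) (PySem.Set.add f p) := rfl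

theorem pvStepA_eq (types : List (String × List (List (String × String)))) (m : Nat)
    (fd : PySem.Set String) (field : List (String × String)) :
    pvStepA (m+1) types fd field = pvFindDeps (m+1) (pvChild field) types fd := by
  unfold pvStepA pvChild
  split
  · rfl
  · rename_i h
    refine (pvFindDeps_guard types _ _ _ ?_).symm
    rcases Bool.eq_false_or_eq_true (PySem.Set.contains fd (pvStrip ((pvLookup field "type").getD ""))) with hc | hc <;>
      rcases Bool.eq_false_or_eq_true ((pvLookup types (pvStrip ((pvLookup field "type").getD ""))).isSome) with hi | hi <;>
      simp [hc, hi] at h ⊢ <;> try exact h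

theorem pv_sim (types : List (String × List (List (String × String)))) :
    ∀ (K : Nat) (f : PySem.Set String), pvMissing types f = K →
      ∀ (n : Nat), pvMissing types f < n → ∀ (p : String) (rest : List String),
        pvVisit (pvCost types (p :: rest) f) (p :: rest) types f
          = pvVisit (pvCost types rest (pvFindDeps n p types f)) rest types (pvFindDeps n p types f) := by
  intro K
  induction K using Nat.strong_induction_on with
  | _ K IH =>
    intro f hK n hn p rest
    obtain ⟨n', rfl⟩ : ∃ n', n = n' + 1 := ⟨n - 1, by omega⟩
    have hcost1 : pvCost types (p :: rest) f = pvCost types rest f + 1 := by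
      simp [pvCost]; omega
    by_cases hg : (PySem.Set.contains f p || !(pvLookup types p).isSome) = true
    · rw [pvFindDeps_guard types _ p f hg, hcost1, pvVisit_cons, if_pos hg]
    · have hs : (pvLookup types p).isSome = true := by
        simp only [Bool.or_eq_true, Bool.not_eq_true'] at hg
        by_contra hne
        exact hg (Or.inr (by simpa using hne))
      have hp : p ∉ f := by
        simp only [Bool.or_eq_true] at hg
        intro hmem
        exact hg (Or.inl (by simpa using hmem))
      obtain ⟨fs, hfs⟩ := Option.isSome_iff_exists.mp hs
      have hKadd : pvMissing types (PySem.Set.add f p) < K := hK ▸ pvMissing_add_lt types hs hp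
      obtain ⟨m, rfl⟩ : ∃ m, n' = m + 1 := ⟨n' - 1, by omega⟩
      have hA : pvFindDeps (m+1+1) p types f = fs.foldl (pvStepA (m+1) types) (PySem.Set.add f p) := by
        rw [pvFindDeps_succ, if_neg hg, hfs, Option.getD_some]
      have FOLD : ∀ (cs : List (List (String × String))) (g : PySem.Set String) (rest' : List String),
          pvMissing types g < K → pvMissing types g < m + 1 →
          pvVisit (pvCost types (cs.map pvChild ++ rest') g) (cs.map pvChild ++ rest') types g
            = pvVisit (pvCost types rest' (cs.foldl (pvStepA (m+1) types) g)) rest' types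
                (cs.foldl (pvStepA (m+1) types) g) := by
        intro cs
        induction cs with
        | nil => intro g rest' _ _; simp
        | cons c cs' ihc =>
          intro g rest' hgK hgn
          rw [List.map_cons, List.cons_append,
            IH (pvMissing types g) hgK g rfl (m+1) hgn (pvChild c) (cs'.map pvChild ++ rest'),
            List.foldl_cons, pvStepA_eq]
          have hsub : g ⊆ pvFindDeps (m+1) (pvChild c) types g := pvFindDeps_subset types _ _ _
          exact ihc (pvFindDeps (m+1) (pvChild c) types g) rest'
            (lt_of_le_of_lt (pvMissing_mono types hsub) hgK)
            (lt_of_le_of_lt (pvMissing_mono types hsub) hgn)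
      rw [hA, hcost1, pvVisit_cons, if_neg hg, hfs, Option.getD_some, pvChildren_eq_map]
      have hb : pvCost types (fs.map pvChild ++ rest) (PySem.Set.add f p) ≤ pvCost types rest f := by
        have hadd := pvCostF_add types hfs hp
        simp only [pvCost, List.length_append, List.length_map]
        omega
      rw [pvVisit_fuel types (fs.map pvChild ++ rest) (PySem.Set.add f p) (le_refl _) hb]
      exact FOLD fs (PySem.Set.add f p) rest hKadd (by omega)

theorem pv_visited_eq (types : List (String × List (List (String × String)))) (p : String) :
    pvVisit (pvFuel types) [p] types PySem.Set.empty
      = pvFindDeps (types.length + 1) p types PySem.Set.empty := by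
  have hm : pvMissing types PySem.Set.empty ≤ types.length := by
    unfold pvMissing
    calc ((types.map Prod.fst).toFinset.filter (fun k => k ∉ (PySem.Set.empty : PySem.Set String))).card
        ≤ (types.map Prod.fst).toFinset.card := Finset.card_filter_le _ _
      _ ≤ (types.map Prod.fst).length := (types.map Prod.fst).toFinset_card_le
      _ = types.length := List.length_map ..
  have hfuel : pvFuel types = pvCost types [p] PySem.Set.empty := by
    have h0 := pvCostF_empty types
    simp only [pvCost, pvFuel, List.length_cons, List.length_nil, h0]
    omega
  rw [hfuel, pv_sim types _ PySem.Set.empty rfl (types.length + 1) (by omega) p [], pvVisit_nil]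

theorem encode_eq (primary_type : String) (types : List (String × List (List (String × String)))) :
    encode_type primary_type types = encode_type_alt primary_type types := by
  simp only [encode_type, encode_type_alt]
  rw [pv_visited_eq]
  have hinit : primary_type ++ "(" ++
      PySem.Str.join "," (((pvLookup types primary_type).getD []).foldl
        (fun acc field => acc ++ [pvFieldStr field]) []) ++ ")"
      = pvEnc primary_type ((pvLookup types primary_type).getD []) := by
    rw [PySem.List.foldl_append_singleton_eq_map, List.nil_append, pvEnc]
  rw [hinit]
  apply PySem.List.foldl_congr_mem
  intro acc x hx
  have hxk : (pvLookup types x).isSome = true := by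
    have hx1 : x ∈ PySem.Set.discard
        (pvFindDeps (types.length + 1) primary_type types PySem.Set.empty) primary_type := by
      exact (PySem.List.mem_sorted _ _ _ _).mp hx
    have hx2 := ((PySem.Set.mem_discard _ _ _).mp hx1).1
    refine pvFindDeps_keys types _ _ _ ?_ x hx2
    intro y hy
    simp [PySem.Set.empty] at hy
  rw [if_pos hxk, PySem.List.foldl_append_singleton_eq_map, List.nil_append, pvEnc]

-- ===== VERDICT (by name: the statement is the Claim_ definition above) =====
theorem encode_type_spec : Claim_equal_encode_type := by
  intro primary_type types _ _
  unfold Spec_encode_type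
  exact encode_eq primary_type types
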